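-- pv_equiv track=rewrite | github.com/LURKS02/algorithm | algorithm/골드/골드2/9527.py | sumF
-- ===== SOURCE A (Python) =====
-- import math
--
-- def sumF(x):
--     if x <= 0:
--         return 0
--
--     seung = int(math.log2(x))
--     powValue = 2 ** seung
--     if powValue == x:
--         return seung * x // 2 + 1
--
--     diff = x - powValue
--     return sumF(powValue) + diff + sumF(diff)
-- ===== SOURCE B (Python) =====
-- def sumF(x):
--     # per-bit counting: for each bit i, count the integers in [1, x] whose bit i is set
--     total = 0
--     i = 0
--     while 2 ** i <= x:
--         half = 2 ** i
--         period = 2 * half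
--         total += (x + 1) // period * half + max(0, (x + 1) % period - half)
--         i += 1
--     return total
-- ===== Notes on version B (the rewrite author's own statement) =====
-- stated objective: alternative
-- what changed: Replaced A's top-bit-peeling recursion (with float log2) by a single integer loop over bit positions that sums, for each bit i, the closed-form count of integers in [1,x] with bit i set.
import Mathlib
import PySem

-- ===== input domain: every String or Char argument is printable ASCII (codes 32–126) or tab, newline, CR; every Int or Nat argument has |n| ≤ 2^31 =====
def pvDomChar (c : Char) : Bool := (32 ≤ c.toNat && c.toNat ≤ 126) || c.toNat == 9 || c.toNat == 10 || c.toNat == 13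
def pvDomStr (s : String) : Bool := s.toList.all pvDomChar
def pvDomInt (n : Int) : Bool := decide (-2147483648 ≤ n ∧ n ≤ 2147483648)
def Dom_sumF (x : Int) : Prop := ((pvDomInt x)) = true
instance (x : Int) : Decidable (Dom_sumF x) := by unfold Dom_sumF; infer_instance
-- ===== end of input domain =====

-- B replaces A's top-bit-peeling recursion (using float log2) with an integer loop
-- summing each bit position's closed-form count of set bits in [1, x] (objective: alternative).


-- ===== PORT A =====
-- int(math.log2 x) is ported as Nat.log2 x.toNat: exact for 0 < x ≤ 2^31 (double log2 is
-- correctly rounded and never crosses an integer boundary in that range).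
def sumF (x : Int) : Int :=
  if _hx : x ≤ 0 then 0
  else
    let seung : Nat := Nat.log2 x.toNat
    let powValue : Int := 2 ^ seung
    if hp : powValue = x then PySem.Int.floordiv ((seung : Int) * x) 2 + 1
    else
      let diff := x - powValue
      sumF powValue + diff + sumF diff
termination_by x.toNat
decreasing_by
  · have hp' : (2:Int) ^ Nat.log2 x.toNat ≠ x := hp
    have h1 : (2:Nat) ^ Nat.log2 x.toNat ≤ x.toNat := Nat.log2_self_le (by omega)
    have h2 : ((2:Int) ^ Nat.log2 x.toNat) = ((2 ^ Nat.log2 x.toNat : Nat) : Int) := by push_cast; ring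
    omega
  · have h1 : (2:Nat) ^ Nat.log2 x.toNat ≤ x.toNat := Nat.log2_self_le (by omega)
    have h2 : ((2:Int) ^ Nat.log2 x.toNat) = ((2 ^ Nat.log2 x.toNat : Nat) : Int) := by push_cast; ring
    have h3 : (0:Nat) < 2 ^ Nat.log2 x.toNat := Nat.pow_pos (by omega)
    omega

-- ===== PORT B =====
def sumFAltLoop (x : Int) (i : Nat) (total : Int) : Int :=
  if (2:Int) ^ i ≤ x then
    let half : Int := 2 ^ i
    let period : Int := 2 * half
    sumFAltLoop x (i + 1)
      (total + PySem.Int.floordiv (x + 1) period * half + max 0 (PySem.Int.mod (x + 1) period - half))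
  else total
termination_by (x + 1 - 2 ^ i).toNat
decreasing_by
  have h1 : (0:Int) < 2 ^ i := pow_pos (by norm_num) i
  omega

def sumF_alt (x : Int) : Int := sumFAltLoop x 0 0

-- ===== PRECONDITION & SPEC =====
def Spec_sumF (x : Int) (out : Int) : Prop := out = sumF_alt x
instance (x : Int) (out : Int) : Decidable (Spec_sumF x out) := by unfold Spec_sumF; infer_instance

-- ===== CLAIM (what is proved, stated in full; the proofs are below) =====
def Claim_equal_sumF : Prop := ∀ (x : Int), Dom_sumF x → Spec_sumF x (sumF x)

-- ===== LEMMAS AND PROOFS =====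

-- the per-bit term B's loop adds at position i
def cBit (i : Nat) (x : Int) : Int :=
  PySem.Int.floordiv (x + 1) (2 * 2 ^ i) * 2 ^ i + max 0 (PySem.Int.mod (x + 1) (2 * 2 ^ i) - 2 ^ i)

lemma loop_term (x : Int) (i : Nat) (h : (2:Int) ^ i ≤ x) (t : Int) :
    sumFAltLoop x i t = sumFAltLoop x (i + 1) (t + cBit i x) := by
  rw [sumFAltLoop]
  simp only [h, if_true, cBit]
  ring_nf

lemma loop_stop (x : Int) (i : Nat) (h : ¬ (2:Int) ^ i ≤ x) (t : Int) :
    sumFAltLoop x i t = t := by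
  rw [sumFAltLoop]; simp [h]

lemma loop_sum (s : Nat) (x : Int) (hlo : (2:Int) ^ s ≤ x) (hhi : x < 2 ^ (s + 1)) :
    ∀ (k i : Nat) (t : Int), i + k = s + 1 →
      sumFAltLoop x i t = t + ∑ j ∈ Finset.Ico i (s + 1), cBit j x := by
  intro k
  induction k with
  | zero =>
    intro i t hi
    have hi' : i = s + 1 := by omega
    subst hi'
    rw [loop_stop x (s + 1) (by omega), Finset.Ico_self, Finset.sum_empty]
    ring
  | succ k ih =>
    intro i t hi
    have hile : i ≤ s := by omega
    have hle : (2:Int) ^ i ≤ x :=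
      le_trans (pow_le_pow_right₀ (by norm_num : (1:Int) ≤ 2) hile) hlo
    rw [loop_term x i hle, ih (i + 1) _ (by omega),
      Finset.sum_eq_sum_Ico_succ_bot (by omega : i < s + 1)]
    ring

lemma cBit_small (i : Nat) (d : Int) (hd0 : 0 ≤ d) (hd : d < 2 ^ i) : cBit i d = 0 := by
  have h1 : (0:Int) < 2 ^ i := pow_pos (by norm_num) i
  have hp : (0:Int) < 2 * 2 ^ i := by omega
  unfold cBit
  rw [PySem.Int.floordiv_eq_ediv_of_pos hp, PySem.Int.mod_eq_emod_of_pos hp,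
    Int.ediv_eq_zero_of_lt (by omega) (by omega), Int.emod_eq_of_lt (by omega) (by omega)]
  omega

lemma cBit_split (i s : Nat) (d : Int) (hi : i < s) :
    cBit i ((2:Int) ^ s + d) = 2 ^ (s - 1 - i) * 2 ^ i + cBit i d := by
  have h1 : (0:Int) < 2 ^ i := pow_pos (by norm_num) i
  have hp : (0:Int) < 2 * 2 ^ i := by omega
  have hq : (2:Int) ^ s = 2 ^ (s - 1 - i) * (2 * 2 ^ i) := by
    rw [show (2:Int) ^ (s - 1 - i) * (2 * 2 ^ i) = 2 ^ (s - 1 - i) * 2 ^ i * 2 by ring,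
      ← pow_add, ← pow_succ]
    congr 1; omega
  unfold cBit
  rw [PySem.Int.floordiv_eq_ediv_of_pos hp, PySem.Int.mod_eq_emod_of_pos hp,
    PySem.Int.floordiv_eq_ediv_of_pos hp, PySem.Int.mod_eq_emod_of_pos hp]
  rw [show (2:Int) ^ s + d + 1 = d + 1 + 2 * 2 ^ i * 2 ^ (s - 1 - i) by rw [hq]; ring]
  rw [Int.add_mul_ediv_left _ _ (by omega : (2:Int) * 2 ^ i ≠ 0), Int.add_mul_emod_self_left]
  ring

lemma cBit_pow (i s : Nat) (hi : i < s) : cBit i ((2:Int) ^ s) = 2 ^ (s - 1 - i) * 2 ^ i := by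
  have := cBit_split i s 0 hi
  simpa [cBit_small i 0 le_rfl (pow_pos (by norm_num) i)] using this

lemma cBit_top (s : Nat) (d : Int) (hd0 : 0 ≤ d) (hd : d < 2 ^ s) :
    cBit s ((2:Int) ^ s + d) = d + 1 := by
  have h1 : (0:Int) < 2 ^ s := pow_pos (by norm_num) s
  have hp : (0:Int) < 2 * 2 ^ s := by omega
  unfold cBit
  rw [PySem.Int.floordiv_eq_ediv_of_pos hp, PySem.Int.mod_eq_emod_of_pos hp]
  by_cases hc : d + 1 = 2 ^ s
  · rw [show (2:Int) ^ s + d + 1 = 1 * (2 * 2 ^ s) by omega]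
    rw [Int.mul_ediv_cancel _ (by omega), Int.mul_emod_left]
    omega
  · rw [Int.ediv_eq_zero_of_lt (by omega) (by omega), Int.emod_eq_of_lt (by omega) (by omega)]
    omega

lemma alt_nonpos (x : Int) (hx : x ≤ 0) : sumF_alt x = 0 := by
  rw [sumF_alt, loop_stop]
  simp; omega

lemma alt_eq_sum (s : Nat) (x : Int) (hlo : (2:Int) ^ s ≤ x) (hhi : x < 2 ^ (s + 1)) :
    sumF_alt x = ∑ j ∈ Finset.range (s + 1), cBit j x := by
  rw [sumF_alt, loop_sum s x hlo hhi (s + 1) 0 0 (by omega), Finset.range_eq_Ico]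
  ring

lemma alt_pow (s : Nat) : sumF_alt ((2:Int) ^ s) = (s : Int) * 2 ^ (s - 1) + 1 := by
  have h1 : (0:Int) < 2 ^ s := pow_pos (by norm_num) s
  have hhi : (2:Int) ^ s < 2 ^ (s + 1) := by
    have : (2:Int) ^ (s + 1) = 2 ^ s * 2 := pow_succ 2 s
    omega
  rw [alt_eq_sum s _ le_rfl hhi, Finset.sum_range_succ,
    show ((2:Int) ^ s) = 2 ^ s + 0 by ring, cBit_top s 0 le_rfl h1]
  have hterm : ∀ j ∈ Finset.range s, cBit j ((2:Int) ^ s + 0) = 2 ^ (s - 1) := by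
    intro j hj
    have hj' : j < s := Finset.mem_range.mp hj
    rw [show ((2:Int) ^ s + 0) = 2 ^ s by ring, cBit_pow j s hj', ← pow_add]
    congr 1; omega
  rw [Finset.sum_congr rfl hterm, Finset.sum_const, Finset.card_range]
  simp

lemma alt_split (s : Nat) (d : Int) (h0 : 0 < d) (hd : d < 2 ^ s) :
    sumF_alt ((2:Int) ^ s + d) = sumF_alt ((2:Int) ^ s) + d + sumF_alt d := by
  have h1 : (0:Int) < 2 ^ s := pow_pos (by norm_num) s
  set t := Nat.log2 d.toNat with ht
  have hn1 : (2:Nat) ^ t ≤ d.toNat := Nat.log2_self_le (by omega)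
  have hn2 : d.toNat < 2 ^ (t + 1) := Nat.lt_log2_self
  have hc1 : ((2:Int) ^ t) = ((2 ^ t : Nat) : Int) := by push_cast; ring
  have hc2 : ((2:Int) ^ (t + 1)) = ((2 ^ (t + 1) : Nat) : Int) := by push_cast; ring
  have hdlo : (2:Int) ^ t ≤ d := by omega
  have hdhi : d < 2 ^ (t + 1) := by omega
  have hts : t < s := by
    have : (2:Int) ^ t < 2 ^ s := by omega
    exact (pow_lt_pow_iff_right₀ (by norm_num : (1:Int) < 2)).mp this
  have hx2 : (2:Int) ^ s + d < 2 ^ (s + 1) := by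
    have : (2:Int) ^ (s + 1) = 2 ^ s * 2 := pow_succ 2 s
    omega
  rw [alt_eq_sum s ((2:Int) ^ s + d) (by omega) hx2, alt_eq_sum t d hdlo hdhi, alt_pow s]
  rw [Finset.sum_range_succ, cBit_top s d h0.le hd]
  have hterm : ∀ j ∈ Finset.range s, cBit j ((2:Int) ^ s + d) = 2 ^ (s - 1 - j) * 2 ^ j + cBit j d := by
    intro j hj
    exact cBit_split j s d (Finset.mem_range.mp hj)
  rw [Finset.sum_congr rfl hterm, Finset.sum_add_distrib]
  have hconst : ∀ j ∈ Finset.range s, ((2:Int) ^ (s - 1 - j) * 2 ^ j) = 2 ^ (s - 1) := by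
    intro j hj
    have hj' : j < s := Finset.mem_range.mp hj
    rw [← pow_add]; congr 1; omega
  rw [Finset.sum_congr rfl hconst, Finset.sum_const, Finset.card_range]
  have hsplitsum : ∑ j ∈ Finset.range s, cBit j d
      = ∑ j ∈ Finset.range (t + 1), cBit j d + ∑ j ∈ Finset.Ico (t + 1) s, cBit j d := by
    rw [Finset.range_eq_Ico]
    exact (Finset.sum_Ico_consecutive _ (Nat.zero_le (t + 1)) (by omega : t + 1 ≤ s)).symm
  have hzero : ∑ j ∈ Finset.Ico (t + 1) s, cBit j d = 0 := by
    apply Finset.sum_eq_zero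
    intro j hj
    have hj' : t + 1 ≤ j := (Finset.mem_Ico.mp hj).1
    apply cBit_small j d h0.le
    calc d < 2 ^ (t + 1) := hdhi
      _ ≤ 2 ^ j := pow_le_pow_right₀ (by norm_num : (1:Int) ≤ 2) hj'
  rw [hsplitsum, hzero]
  simp
  ring

lemma pow_half (s : Nat) :
    PySem.Int.floordiv ((s : Int) * 2 ^ s) 2 = (s : Int) * 2 ^ (s - 1) := by
  cases s with
  | zero => simp [PySem.Int.floordiv]
  | succ n =>
    rw [PySem.Int.floordiv_eq_ediv_of_pos (by norm_num)]
    rw [show ((n + 1 : Nat) : Int) * 2 ^ (n + 1) = (((n + 1 : Nat) : Int) * 2 ^ n) * 2 by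
      rw [pow_succ]; ring]
    rw [Int.mul_ediv_cancel _ (by norm_num)]
    simp

lemma main_aux : ∀ (n : Nat) (x : Int), x.toNat ≤ n → sumF x = sumF_alt x := by
  intro n
  induction n with
  | zero =>
    intro x hx
    have hx0 : x ≤ 0 := by omega
    rw [sumF, alt_nonpos x hx0]
    simp [hx0]
  | succ n ih =>
    intro x hx
    by_cases hx0 : x ≤ 0
    · rw [sumF, alt_nonpos x hx0]; simp [hx0]
    · have h1 : (2:Nat) ^ Nat.log2 x.toNat ≤ x.toNat := Nat.log2_self_le (by omega)
      have h2 : x.toNat < 2 ^ (Nat.log2 x.toNat + 1) := Nat.lt_log2_self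
      have hc1 : ((2:Int) ^ Nat.log2 x.toNat) = ((2 ^ Nat.log2 x.toNat : Nat) : Int) := by
        push_cast; ring
      have hc2 : ((2:Int) ^ (Nat.log2 x.toNat + 1)) = ((2 ^ (Nat.log2 x.toNat + 1) : Nat) : Int) := by
        push_cast; ring
      have hlo : (2:Int) ^ Nat.log2 x.toNat ≤ x := by omega
      have hhi : x < 2 ^ (Nat.log2 x.toNat + 1) := by omega
      rw [sumF]
      simp only [hx0, dite_false]
      by_cases hp : (2:Int) ^ Nat.log2 x.toNat = x
      · simp only [hp, dif_pos]
        have halt := alt_pow (Nat.log2 x.toNat)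
        rw [hp] at halt
        rw [halt, ← pow_half (Nat.log2 x.toNat), hp]
      · simp only [hp, dif_neg, not_false_iff]
        have hppos : (0:Int) < 2 ^ Nat.log2 x.toNat := pow_pos (by norm_num) _
        have ihp : sumF ((2:Int) ^ Nat.log2 x.toNat) = sumF_alt ((2:Int) ^ Nat.log2 x.toNat) :=
          ih _ (by omega)
        have ihd : sumF (x - (2:Int) ^ Nat.log2 x.toNat)
            = sumF_alt (x - (2:Int) ^ Nat.log2 x.toNat) := ih _ (by omega)
        rw [ihp, ihd]
        have := alt_split (Nat.log2 x.toNat) (x - 2 ^ Nat.log2 x.toNat)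
          (by omega) (by have : (2:Int) ^ (Nat.log2 x.toNat + 1) = 2 ^ Nat.log2 x.toNat * 2 := pow_succ 2 _; omega)
        rw [show ((2:Int) ^ Nat.log2 x.toNat + (x - 2 ^ Nat.log2 x.toNat)) = x by ring] at this
        rw [this]

-- ===== VERDICT (by name: the statement is the Claim_ definition above) =====
theorem sumF_spec : Claim_equal_sumF := by
  intro x _
  unfold Spec_sumF
  exact main_aux x.toNat x le_rfl
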